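-- pv_equiv track=rewrite | github.com/schwarztim/archon | backend/app/services/versioning_service.py | _diff_nodes
-- ===== SOURCE A (Python) =====
-- from typing import Any
--
-- def _diff_nodes(
--     old_def: dict[str, Any],
--     new_def: dict[str, Any],
-- ) -> tuple[list[str], list[str], list[dict[str, Any]]]:
--     """Compare graph node definitions, returning added/removed/modified."""
--     old_nodes = old_def.get("nodes", {})
--     new_nodes = new_def.get("nodes", {})
--
--     if not isinstance(old_nodes, dict):
--         old_nodes = {}
--     if not isinstance(new_nodes, dict):
--         new_nodes = {}
--
--     old_keys = set(old_nodes.keys())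
--     new_keys = set(new_nodes.keys())
--
--     added = sorted(new_keys - old_keys)
--     removed = sorted(old_keys - new_keys)
--     modified: list[dict[str, Any]] = []
--
--     for key in sorted(old_keys & new_keys):
--         if old_nodes[key] != new_nodes[key]:
--             modified.append({"node": key, "change": "modified"})
--
--     return added, removed, modified
-- ===== SOURCE B (Python) =====
-- def _diff_nodes(old_def, new_def):
--     """Compare graph node definitions, returning added/removed/modified."""
--     old_nodes = old_def.get("nodes", {})
--     new_nodes = new_def.get("nodes", {})
--
--     if not isinstance(old_nodes, dict):
--         old_nodes = {}
--     if not isinstance(new_nodes, dict):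
--         new_nodes = {}
--
--     # two-pointer merge over the two independently sorted key lists
--     ok = sorted(old_nodes)
--     nk = sorted(new_nodes)
--     added: list[str] = []
--     removed: list[str] = []
--     modified: list[dict] = []
--     i = j = 0
--     while i < len(ok) and j < len(nk):
--         if ok[i] < nk[j]:
--             removed.append(ok[i]); i += 1
--         elif nk[j] < ok[i]:
--             added.append(nk[j]); j += 1
--         else:
--             if old_nodes[ok[i]] != new_nodes[nk[j]]:
--                 modified.append({"node": ok[i], "change": "modified"})
--             i += 1; j += 1
--     added.extend(nk[j:])
--     removed.extend(ok[i:])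
--     return added, removed, modified
-- ===== Notes on version B (the rewrite author's own statement) =====
-- stated objective: alternative
-- what changed: Replaces the three separate set-difference/intersection computations (each followed by its own sort) with a single two-pointer merge over the two independently sorted key lists that classifies each key as added/removed/modified on the fly.
import Mathlib
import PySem

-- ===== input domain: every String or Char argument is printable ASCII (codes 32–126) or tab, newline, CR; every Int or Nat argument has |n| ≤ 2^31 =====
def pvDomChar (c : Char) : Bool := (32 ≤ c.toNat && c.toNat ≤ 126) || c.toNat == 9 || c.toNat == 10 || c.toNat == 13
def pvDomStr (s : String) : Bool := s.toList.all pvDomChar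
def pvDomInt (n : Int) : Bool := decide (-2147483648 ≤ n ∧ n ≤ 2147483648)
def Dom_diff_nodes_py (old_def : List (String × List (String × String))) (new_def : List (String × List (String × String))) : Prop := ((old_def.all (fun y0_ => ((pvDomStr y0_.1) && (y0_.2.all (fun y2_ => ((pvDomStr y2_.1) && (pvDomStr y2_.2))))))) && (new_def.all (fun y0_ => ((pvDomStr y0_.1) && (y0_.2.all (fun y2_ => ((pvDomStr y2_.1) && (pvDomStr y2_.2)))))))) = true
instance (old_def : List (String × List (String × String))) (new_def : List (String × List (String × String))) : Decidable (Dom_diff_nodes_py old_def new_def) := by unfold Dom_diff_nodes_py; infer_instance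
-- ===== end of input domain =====

-- B replaces A's three set-difference/intersection computations by sorting the two key
-- lists independently and classifying every key in one two-pointer merge (alternative
-- decomposition, same asymptotic cost). Under the declared types the 'nodes' values are
-- always dicts, so A's isinstance guards are vacuously true and have no Lean counterpart.

-- ===== PORT A =====
def diff_nodes_py (old_def : List (String × List (String × String))) (new_def : List (String × List (String × String))) : List String × List String × (List (List (String × String))) :=
  let old_nodes : PySem.Dict String String := PySem.Dict.mk ((PySem.Dict.mk old_def).getD "nodes" [])
  let new_nodes : PySem.Dict String String := PySem.Dict.mk ((PySem.Dict.mk new_def).getD "nodes" [])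
  let old_keys : PySem.Set String := PySem.Set.ofList old_nodes.keys
  let new_keys : PySem.Set String := PySem.Set.ofList new_nodes.keys
  let added := PySem.List.sorted (PySem.Set.diff new_keys old_keys) (fun x => x) false
  let removed := PySem.List.sorted (PySem.Set.diff old_keys new_keys) (fun x => x) false
  let modified := (PySem.List.sorted (PySem.Set.inter old_keys new_keys) (fun x => x) false).foldl
    (fun (acc : List (List (String × String))) key =>
      if old_nodes.getD key "" != new_nodes.getD key "" then
        acc ++ [[("node", key), ("change", "modified")]]
      else acc) []
  (added, removed, modified)

-- ===== PORT B =====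
-- the while loop of Source B: two cursors over the sorted key lists, appending to the three
-- accumulators; the trailing extend()s are the catch-all arm once one list is exhausted
def pvMerge (onod nnod : PySem.Dict String String) :
    List String → List String →
    List String × List String × List (List (String × String)) →
    List String × List String × List (List (String × String))
  | x :: xs, y :: ys, (a, r, m) =>
      if x < y then pvMerge onod nnod xs (y :: ys) (a, r ++ [x], m)
      else if y < x then pvMerge onod nnod (x :: xs) ys (a ++ [y], r, m)
      else if onod.getD x "" != nnod.getD y "" then
        pvMerge onod nnod xs ys (a, r, m ++ [[("node", x), ("change", "modified")]])
      else pvMerge onod nnod xs ys (a, r, m)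
  | xs, ys, (a, r, m) => (a ++ ys, r ++ xs, m)
  termination_by xs ys _ => xs.length + ys.length
  decreasing_by all_goals (simp; try omega)

def diff_nodes_py_alt (old_def : List (String × List (String × String))) (new_def : List (String × List (String × String))) : List String × List String × (List (List (String × String))) :=
  let onod : PySem.Dict String String := PySem.Dict.mk ((PySem.Dict.mk old_def).getD "nodes" [])
  let nnod : PySem.Dict String String := PySem.Dict.mk ((PySem.Dict.mk new_def).getD "nodes" [])
  -- sorted(old_nodes): a Python dict's keys are distinct, which Set.ofList makes explicit
  let ok := PySem.List.sorted (PySem.Set.ofList onod.keys) (fun x => x) false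
  let nk := PySem.List.sorted (PySem.Set.ofList nnod.keys) (fun x => x) false
  pvMerge onod nnod ok nk ([], [], [])

-- ===== PRECONDITION & SPEC =====
def Spec_diff_nodes_py (old_def : List (String × List (String × String))) (new_def : List (String × List (String × String))) (out : List String × List String × (List (List (String × String)))) : Prop := out = diff_nodes_py_alt old_def new_def
instance (old_def : List (String × List (String × String))) (new_def : List (String × List (String × String))) (out : List String × List String × (List (List (String × String)))) : Decidable (Spec_diff_nodes_py old_def new_def out) := by unfold Spec_diff_nodes_py; infer_instance

-- ===== CLAIM =====
def Claim_equal_diff_nodes_py : Prop := ∀ (old_def : List (String × List (String × String))) (new_def : List (String × List (String × String))), Dom_diff_nodes_py old_def new_def → Spec_diff_nodes_py old_def new_def (diff_nodes_py old_def new_def)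

-- ===== LEMMAS AND PROOFS =====

theorem filterMap_ifsome {α β : Type} (p : α → Bool) (f : α → β) (l : List α) :
    l.filterMap (fun k => if p k then some (f k) else none) = (l.filter p).map f := by
  induction l with
  | nil => simp
  | cons x t ih =>
    by_cases h : p x <;> simp [h, ih]

-- the two-pointer merge, computed: filters of the two sorted inputs
theorem contains_cons_of_lt (w : String) (l : List String) (z : String) (h : w < z) :
    ((w :: l).contains z) = l.contains z := by
  simp only [List.contains_eq_mem, List.mem_cons]
  simp [(ne_of_lt h).symm]

theorem merge_spec (onod nnod : PySem.Dict String String) :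
    ∀ (xs ys a r : List String) (m : List (List (String × String))),
    xs.Pairwise (· < ·) → ys.Pairwise (· < ·) →
    pvMerge onod nnod xs ys (a, r, m) =
      (a ++ ys.filter (fun y => !xs.contains y),
       r ++ xs.filter (fun x => !ys.contains x),
       m ++ (xs.filter (fun x => ys.contains x)).filterMap
         (fun k => if onod.getD k "" != nnod.getD k "" then
            some [("node", k), ("change", "modified")] else none)) := by
  intro xs
  induction xs with
  | nil => intro ys a r m _ _; simp [pvMerge]
  | cons x xs ihx =>
    intro ys
    induction ys with
    | nil => intro a r m _ _; simp [pvMerge]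
    | cons y ys ihy =>
      intro a r m hxs hys
      have hxlt : ∀ z ∈ xs, x < z := fun z hz => (List.pairwise_cons.mp hxs).1 z hz
      have hylt : ∀ z ∈ ys, y < z := fun z hz => (List.pairwise_cons.mp hys).1 z hz
      have hxs' : xs.Pairwise (· < ·) := (List.pairwise_cons.mp hxs).2
      have hys' : ys.Pairwise (· < ·) := (List.pairwise_cons.mp hys).2
      by_cases hlt : x < y
      · -- x only in old: removed
        have h1 : ∀ z ∈ y :: ys, x < z := by
          intro z hz
          rcases List.mem_cons.mp hz with rfl | hz
          · exact hlt
          · exact hlt.trans (hylt z hz)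
        have eA : (y :: ys).filter (fun z => !(x :: xs).contains z)
            = (y :: ys).filter (fun z => !xs.contains z) :=
          List.filter_congr (fun z hz => by rw [contains_cons_of_lt x xs z (h1 z hz)])
        have hxny : x ≠ y := ne_of_lt hlt
        have hxnys : x ∉ ys := fun hz => lt_irrefl x (hlt.trans (hylt x hz))
        rw [pvMerge, if_pos hlt, ihx (y :: ys) a (r ++ [x]) m hxs' hys, eA]
        simp [List.filter_cons, hxny, hxnys, List.append_assoc]
      · by_cases hgt : y < x
        · -- y only in new: added
          have h2 : ∀ z ∈ x :: xs, y < z := by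
            intro z hz
            rcases List.mem_cons.mp hz with rfl | hz
            · exact hgt
            · exact hgt.trans (hxlt z hz)
          have eR : (x :: xs).filter (fun z => !(y :: ys).contains z)
              = (x :: xs).filter (fun z => !ys.contains z) :=
            List.filter_congr (fun z hz => by rw [contains_cons_of_lt y ys z (h2 z hz)])
          have eM : (x :: xs).filter (fun z => (y :: ys).contains z)
              = (x :: xs).filter (fun z => ys.contains z) :=
            List.filter_congr (fun z hz => contains_cons_of_lt y ys z (h2 z hz))
          have hynx : y ≠ x := ne_of_lt hgt
          have hynxs : y ∉ xs := fun hz => lt_irrefl y (hgt.trans (hxlt y hz))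
          rw [pvMerge, if_neg hlt, if_pos hgt, ihy (a ++ [y]) r m hxs hys', eR, eM]
          simp [List.filter_cons, hynx, hynxs, List.append_assoc]
        · -- equal key: maybe modified
          have heq : x = y := le_antisymm (not_lt.mp hgt) (not_lt.mp hlt)
          subst heq
          have hselfx : ((x :: xs).contains x) = true := by simp
          have hselfy : ((x :: ys).contains x) = true := by simp
          have eA : (x :: ys).filter (fun z => !(x :: xs).contains z)
              = ys.filter (fun z => !xs.contains z) := by
            simp only [List.filter_cons, hselfx, Bool.not_true, Bool.false_eq_true, if_false]
            exact List.filter_congr (fun z hz => by rw [contains_cons_of_lt x xs z (hylt z hz)])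
          have eR : (x :: xs).filter (fun z => !(x :: ys).contains z)
              = xs.filter (fun z => !ys.contains z) := by
            simp only [List.filter_cons, hselfy, Bool.not_true, Bool.false_eq_true, if_false]
            exact List.filter_congr (fun z hz => by rw [contains_cons_of_lt x ys z (hxlt z hz)])
          have eM : (x :: xs).filter (fun z => (x :: ys).contains z)
              = x :: xs.filter (fun z => ys.contains z) := by
            simp only [List.filter_cons, hselfy, if_true]
            rw [List.filter_congr (fun z hz => contains_cons_of_lt x ys z (hxlt z hz))]
          by_cases hdiff : (onod.getD x "" != nnod.getD x "") = true
          · have hne : onod.getD x "" ≠ nnod.getD x "" := bne_iff_ne.mp hdiff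
            rw [pvMerge, if_neg hlt, if_neg hgt, if_pos hdiff,
              ihx ys a r (m ++ [[("node", x), ("change", "modified")]]) hxs' hys', eA, eR, eM]
            simp [hne, List.append_assoc]
          · have heqv : onod.getD x "" = nnod.getD x "" := by
              by_contra hne
              exact hdiff (bne_iff_ne.mpr hne)
            rw [pvMerge, if_neg hlt, if_neg hgt, if_neg hdiff, ihx ys a r m hxs' hys', eA, eR, eM]
            simp [heqv]

-- A strictly sorted list equal (as a set) to a nodup list ys is sorted(ys).
theorem sorted_eq_filter (ys zs : List String)
    (hnd : ys.Nodup) (hnd' : zs.Nodup) (hpw : zs.Pairwise (· < ·))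
    (hmem : ∀ x, x ∈ zs ↔ x ∈ ys) :
    PySem.List.sorted ys (fun x => x) false = zs := by
  apply PySem.List.sorted_eq_of_perm_of_pairwise_lt
  · exact (List.perm_ext_iff_of_nodup hnd' hnd).mpr hmem
  · simpa using hpw

-- ===== VERDICT is at the bottom =====
theorem diff_nodes_py_spec : Claim_equal_diff_nodes_py := by
  intro old_def new_def _
  unfold Spec_diff_nodes_py diff_nodes_py diff_nodes_py_alt
  simp only []
  set onod : PySem.Dict String String := PySem.Dict.mk ((PySem.Dict.mk old_def).getD "nodes" []) with hon
  set nnod : PySem.Dict String String := PySem.Dict.mk ((PySem.Dict.mk new_def).getD "nodes" []) with hnn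
  set ok := PySem.List.sorted (PySem.Set.ofList onod.keys) (fun x => x) false with hok
  set nk := PySem.List.sorted (PySem.Set.ofList nnod.keys) (fun x => x) false with hnk
  have hpok : ok.Pairwise (· < ·) := by rw [hok]; exact PySem.List.sorted_ofList_pairwise_lt _
  have hpnk : nk.Pairwise (· < ·) := by rw [hnk]; exact PySem.List.sorted_ofList_pairwise_lt _
  have hndok : ok.Nodup := hpok.imp ne_of_lt
  have hndnk : nk.Nodup := hpnk.imp ne_of_lt
  have hmemok : ∀ z, z ∈ ok ↔ z ∈ onod.keys := by
    intro z; rw [hok, PySem.List.mem_sorted, PySem.Set.mem_ofList]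
  have hmemnk : ∀ z, z ∈ nk ↔ z ∈ nnod.keys := by
    intro z; rw [hnk, PySem.List.mem_sorted, PySem.Set.mem_ofList]
  rw [merge_spec onod nnod ok nk [] [] [] hpok hpnk]
  refine Prod.ext ?_ (Prod.ext ?_ ?_) <;> simp only [List.nil_append]
  · -- added
    apply sorted_eq_filter
    · exact PySem.Set.nodup_diff _ _ (PySem.Set.nodup_ofList _)
    · exact hndnk.filter _
    · exact hpnk.filter _
    · intro z
      simp only [List.mem_filter, hmemnk, PySem.Set.mem_diff, PySem.Set.mem_ofList,
        Bool.not_eq_true', List.contains_eq_mem, decide_eq_false_iff_not, hmemok]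
      try tauto
  · -- removed
    apply sorted_eq_filter
    · exact PySem.Set.nodup_diff _ _ (PySem.Set.nodup_ofList _)
    · exact hndok.filter _
    · exact hpok.filter _
    · intro z
      simp only [List.mem_filter, hmemok, PySem.Set.mem_diff, PySem.Set.mem_ofList,
        Bool.not_eq_true', List.contains_eq_mem, decide_eq_false_iff_not, hmemnk]
      try tauto
  · -- modified
    have hint : PySem.List.sorted (PySem.Set.inter (PySem.Set.ofList onod.keys) (PySem.Set.ofList nnod.keys)) (fun x => x) false
        = ok.filter (fun x => nk.contains x) := by
      apply sorted_eq_filter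
      · exact PySem.Set.nodup_inter _ _ (PySem.Set.nodup_ofList _)
      · exact hndok.filter _
      · exact hpok.filter _
      · intro z
        simp only [List.mem_filter, hmemok, PySem.Set.mem_inter, PySem.Set.mem_ofList,
          List.contains_eq_mem, decide_eq_true_eq, hmemnk]
        try tauto
    rw [PySem.List.foldl_append_if, filterMap_ifsome, hint]
    simp
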